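-- pv_equiv track=rewrite | github.com/RaggedR/rsk-transformer | rsk.py | _is_horizontal_strip
-- ===== SOURCE A (Python) =====
-- def partition_conjugate(lam: list[int]) -> list[int]:
--     """Transpose a partition: row lengths → column lengths (and vice versa)."""
--     if not lam:
--         return []
--     return [sum(1 for part in lam if part > j) for j in range(lam[0])]
--
-- def _is_horizontal_strip(mu: list[int], lam: list[int]) -> bool:
--     """Check if λ/μ is a horizontal strip (at most one box per column)."""
--     mu_conj = partition_conjugate(mu) if mu else []
--     lam_conj = partition_conjugate(lam) if lam else []
--     max_len = max(len(mu_conj), len(lam_conj))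
--     for j in range(max_len):
--         mc = mu_conj[j] if j < len(mu_conj) else 0
--         lc = lam_conj[j] if j < len(lam_conj) else 0
--         if lc < mc or lc > mc + 1:
--             return False
--     return True
-- ===== SOURCE B (Python) =====
-- def _is_horizontal_strip(mu: list[int], lam: list[int]) -> bool:
--     """Check if λ/μ is a horizontal strip (at most one box per column)."""
--     # One pass over each list builds a multiplicity table and the count of
--     # positive parts; a single sweep over the columns then maintains the
--     # running counts instead of re-scanning the lists for every column.
--     cnt_mu = {}
--     a = 0
--     for x in mu:
--         cnt_mu[x] = cnt_mu.get(x, 0) + 1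
--         if x > 0:
--             a += 1
--     cnt_lam = {}
--     b = 0
--     for x in lam:
--         cnt_lam[x] = cnt_lam.get(x, 0) + 1
--         if x > 0:
--             b += 1
--     m_len = mu[0] if mu and mu[0] > 0 else 0
--     l_len = lam[0] if lam and lam[0] > 0 else 0
--     j = 0
--     top = max(m_len, l_len)
--     while j < top:
--         mc = a if j < m_len else 0
--         lc = b if j < l_len else 0
--         if lc < mc or lc > mc + 1:
--             return False
--         j += 1
--         a -= cnt_mu.get(j, 0)
--         b -= cnt_lam.get(j, 0)
--     return True
-- ===== Notes on version B (the rewrite author's own statement) =====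
-- stated objective: faster
-- what changed: A builds both conjugate partitions by re-scanning the whole list for every column j (O(n) work per column); B builds a value-multiplicity dict and the count of positive parts in one pass per list, then sweeps the columns once maintaining running counts, so each column costs O(1).
import Mathlib
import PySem

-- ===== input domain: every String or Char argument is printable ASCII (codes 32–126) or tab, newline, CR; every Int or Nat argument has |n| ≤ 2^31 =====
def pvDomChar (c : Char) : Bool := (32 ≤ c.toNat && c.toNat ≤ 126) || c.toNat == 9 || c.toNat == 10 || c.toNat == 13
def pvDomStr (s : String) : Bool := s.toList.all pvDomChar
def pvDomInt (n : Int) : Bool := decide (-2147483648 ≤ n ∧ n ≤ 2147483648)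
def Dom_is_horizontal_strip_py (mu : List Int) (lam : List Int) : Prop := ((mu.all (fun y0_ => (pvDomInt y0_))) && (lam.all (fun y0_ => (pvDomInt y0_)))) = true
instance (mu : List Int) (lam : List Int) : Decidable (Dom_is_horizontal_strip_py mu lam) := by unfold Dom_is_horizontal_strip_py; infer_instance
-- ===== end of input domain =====

-- B replaces A's per-column rescans of both lists (via conjugate partitions) with
-- multiplicity tables built in one pass and a single sweep maintaining running counts.

-- ===== PORT A =====
-- partition_conjugate(lam): [sum(1 for part in lam if part > j) for j in range(lam[0])]
def partition_conjugate_py (lam : List Int) : List Int :=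
  match lam with
  | [] => []
  | l0 :: _ =>
      (PySem.List.pyRange 0 l0 1).map
        (fun j => ((lam.map (fun part => if j < part then (1 : Int) else 0)).sum))

-- the 'for j in range(max_len): … return False' loop, early return as recursion
def loopA_py (muc lamc : List Int) : List Int → Bool
  | [] => true
  | j :: js =>
      let mc := if j < (muc.length : Int) then PySem.List.pyGetD muc j 0 else 0
      let lc := if j < (lamc.length : Int) then PySem.List.pyGetD lamc j 0 else 0
      if lc < mc || lc > mc + 1 then false else loopA_py muc lamc js

def is_horizontal_strip_py (mu : List Int) (lam : List Int) : Bool :=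
  let mu_conj := if mu = [] then [] else partition_conjugate_py mu
  let lam_conj := if lam = [] then [] else partition_conjugate_py lam
  let max_len : Int := max (mu_conj.length : Int) (lam_conj.length : Int)
  loopA_py mu_conj lam_conj (PySem.List.pyRange 0 max_len 1)

-- ===== PORT B =====
-- one pass: builds {value: multiplicity} and counts the entries > 0
def countLoop_alt (xs : List Int) : PySem.Dict Int Int × Int :=
  xs.foldl
    (fun s x => (s.1.insert x (s.1.getD x 0 + 1), if 0 < x then s.2 + 1 else s.2))
    (PySem.Dict.empty, 0)

-- the 'while j < top' sweep with running counts a, b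
def loopB_alt (cm cl : PySem.Dict Int Int) (mlen llen : Int) : List Int → Int → Int → Bool
  | [], _, _ => true
  | j :: js, a, b =>
      let mc := if j < mlen then a else 0
      let lc := if j < llen then b else 0
      if lc < mc || lc > mc + 1 then false
      else loopB_alt cm cl mlen llen js (a - cm.getD (j + 1) 0) (b - cl.getD (j + 1) 0)

def is_horizontal_strip_py_alt (mu : List Int) (lam : List Int) : Bool :=
  let sm := countLoop_alt mu
  let sl := countLoop_alt lam
  let mlen : Int := if 0 < mu.headD 0 then mu.headD 0 else 0
  let llen : Int := if 0 < lam.headD 0 then lam.headD 0 else 0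
  loopB_alt sm.1 sl.1 mlen llen (PySem.List.pyRange 0 (max mlen llen) 1) sm.2 sl.2

-- ===== PRECONDITION & SPEC =====
def Spec_is_horizontal_strip_py (mu : List Int) (lam : List Int) (out : Bool) : Prop := out = is_horizontal_strip_py_alt mu lam
instance (mu : List Int) (lam : List Int) (out : Bool) : Decidable (Spec_is_horizontal_strip_py mu lam out) := by unfold Spec_is_horizontal_strip_py; infer_instance

-- ===== CLAIM (what is proved, stated in full; the proofs are below) =====
def Claim_equal_is_horizontal_strip_py : Prop := ∀ (mu : List Int) (lam : List Int), Dom_is_horizontal_strip_py mu lam → Spec_is_horizontal_strip_py mu lam (is_horizontal_strip_py mu lam)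

-- ===== LEMMAS AND PROOFS =====

-- number of entries of xs strictly greater than j, as an Int
def cntGt (xs : List Int) (j : Int) : Int := (xs.countP (fun x => decide (j < x)) : Nat)

-- the per-column test both loops perform
def okCol (mu lam : List Int) (mlen llen j : Int) : Bool :=
  let mc := if j < mlen then cntGt mu j else 0
  let lc := if j < llen then cntGt lam j else 0
  !(lc < mc || lc > mc + 1)

theorem countP_gt_step (xs : List Int) (j : Int) :
    xs.countP (fun x => decide (j < x))
      = xs.countP (fun x => decide (j + 1 < x)) + xs.count (j + 1) := by
  induction xs with
  | nil => rfl
  | cons x t ih =>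
    simp only [List.countP_cons, List.count_cons, ih]
    rcases lt_trichotomy x (j + 1) with h | h | h
    · simp [show ¬(j < x) from by omega, show ¬(j + 1 < x) from by omega,
        show ¬(x = j + 1) from by omega]
    · simp [h]
      omega
    · simp [show j < x from by omega, h, show ¬(x = j + 1) from by omega]
      omega

theorem cntGt_step (xs : List Int) (j : Int) :
    cntGt xs (j + 1) = cntGt xs j - (xs.count (j + 1) : Int) := by
  have h := countP_gt_step xs j
  unfold cntGt
  omega

theorem countLoop_dict (xs : List Int) (d : PySem.Dict Int Int) (v : Int) :
    (xs.foldl (fun d x => d.insert x (d.getD x 0 + 1)) d).getD v 0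
      = d.getD v 0 + (xs.count v : Int) := by
  induction xs generalizing d with
  | nil => simp
  | cons x t ih =>
    simp only [List.foldl_cons, ih, PySem.Dict.getD_insert, List.count_cons]
    by_cases h : v = x
    · subst h
      rw [if_pos rfl, if_pos (by simp : (v == v) = true)]
      push_cast
      omega
    · rw [if_neg h, if_neg (by simp [Ne.symm h] : ¬(x == v) = true)]
      push_cast
      omega

theorem countLoop_spec (xs : List Int) :
    (countLoop_alt xs).2 = cntGt xs 0 ∧
      ∀ v, (countLoop_alt xs).1.getD v 0 = (xs.count v : Int) := by
  unfold countLoop_alt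
  rw [PySem.List.foldl_prod_mk (f := fun (d : PySem.Dict Int Int) (x : Int) => d.insert x (d.getD x 0 + 1))
        (g := fun (a x : Int) => if 0 < x then a + 1 else a)]
  refine ⟨?_, fun v => ?_⟩
  · rw [PySem.List.foldl_ite_add_one (p := fun x => 0 < x)]
    simp [cntGt]
  · rw [countLoop_dict]; simp

theorem loopB_all (mu lam : List Int) (cm cl : PySem.Dict Int Int) (mlen llen : Int)
    (hcm : ∀ v, cm.getD v 0 = (mu.count v : Int))
    (hcl : ∀ v, cl.getD v 0 = (lam.count v : Int)) :
    ∀ (n : Nat) (j a b : Int), a = cntGt mu j → b = cntGt lam j →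
      loopB_alt cm cl mlen llen (PySem.List.pyRange j (j + n) 1) a b
        = (PySem.List.pyRange j (j + n) 1).all (okCol mu lam mlen llen) := by
  intro n
  induction n with
  | zero => intro j a b _ _; simp [PySem.List.pyRange, loopB_alt]
  | succ n ih =>
    intro j a b ha hb
    have hlt : j < j + (n + 1 : Nat) := by push_cast; omega
    rw [PySem.List.pyRange_one_cons hlt]
    simp only [loopB_alt, List.all_cons]
    have hok : (!(((if j < llen then b else 0) < (if j < mlen then a else 0)) ||
        ((if j < llen then b else 0) > (if j < mlen then a else 0) + 1)))
        = okCol mu lam mlen llen j := by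
      simp [okCol, ha, hb]
    by_cases hfail : ((if j < llen then b else 0) < (if j < mlen then a else 0)) ||
        ((if j < llen then b else 0) > (if j < mlen then a else 0) + 1)
    · rw [if_pos hfail]
      have : okCol mu lam mlen llen j = false := by rw [← hok, hfail]; rfl
      simp [this]
    · rw [if_neg hfail]
      have hjn : j + 1 + (n : Int) = j + ((n + 1 : Nat) : Int) := by push_cast; omega
      have := ih (j + 1) (a - cm.getD (j + 1) 0) (b - cl.getD (j + 1) 0)
        (by rw [hcm, cntGt_step, ha]) (by rw [hcl, cntGt_step, hb])
      rw [hjn] at this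
      rw [this]
      have : okCol mu lam mlen llen j = true := by
        rw [← hok]; simp only [hfail]; rfl
      simp [this]

theorem loopA_all (mu lam : List Int) (muc lamc : List Int) (mlen llen : Int)
    (hmlen : (muc.length : Int) = mlen) (hllen : (lamc.length : Int) = llen)
    (hmc : ∀ j : Int, 0 ≤ j → j < mlen → PySem.List.pyGetD muc j 0 = cntGt mu j)
    (hlc : ∀ j : Int, 0 ≤ j → j < llen → PySem.List.pyGetD lamc j 0 = cntGt lam j) :
    ∀ js : List Int, (∀ j ∈ js, 0 ≤ j) →
      loopA_py muc lamc js = js.all (okCol mu lam mlen llen) := by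
  intro js
  induction js with
  | nil => intro _; rfl
  | cons j t ih =>
    intro hpos
    have hj : 0 ≤ j := hpos j (by simp)
    simp only [loopA_py, List.all_cons, hmlen, hllen]
    have hmc' : (if j < mlen then PySem.List.pyGetD muc j 0 else 0)
        = (if j < mlen then cntGt mu j else 0) := by
      by_cases h : j < mlen <;> simp [h, hmc j hj]
    have hlc' : (if j < llen then PySem.List.pyGetD lamc j 0 else 0)
        = (if j < llen then cntGt lam j else 0) := by
      by_cases h : j < llen <;> simp [h, hlc j hj]
    rw [hmc', hlc']
    by_cases hfail : ((if j < llen then cntGt lam j else 0) < (if j < mlen then cntGt mu j else 0)) ||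
        ((if j < llen then cntGt lam j else 0) > (if j < mlen then cntGt mu j else 0) + 1)
    · rw [if_pos hfail]
      have : okCol mu lam mlen llen j = false := by
        simp only [okCol, hfail]; rfl
      simp [this]
    · rw [if_neg hfail]
      rw [ih (fun x hx => hpos x (by simp [hx]))]
      have : okCol mu lam mlen llen j = true := by
        simp only [okCol, hfail]; rfl
      simp [this]

-- a 0/1 comprehension sum is the count of entries > j
theorem sum_ite_cnt (xs : List Int) (j : Int) :
    (xs.map (fun part => if j < part then (1 : Int) else 0)).sum = cntGt xs j := by
  unfold cntGt
  induction xs with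
  | nil => rfl
  | cons x t ih =>
    by_cases h : j < x
    · simp [h, ih]
      ring
    · simp [h, ih]

-- conjugate facts: length and entries
theorem conj_len (mu : List Int) :
    ((if mu = [] then [] else partition_conjugate_py mu).length : Int)
      = (if 0 < mu.headD 0 then mu.headD 0 else 0) := by
  match mu with
  | [] => simp
  | m0 :: t =>
    simp only [partition_conjugate_py, reduceCtorEq, if_false, List.length_map,
      PySem.List.length_pyRange_one]
    by_cases h : 0 < m0 <;> simp [h] <;> omega

theorem conj_entry (mu : List Int) (hne : mu ≠ []) (j : Int) (h0 : 0 ≤ j)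
    (hj : j < ((partition_conjugate_py mu).length : Int)) :
    PySem.List.pyGetD (partition_conjugate_py mu) j 0 = cntGt mu j := by
  match mu with
  | m0 :: t =>
    simp only [partition_conjugate_py]
    have hj' : j < m0 := by
      simp only [partition_conjugate_py, List.length_map,
        PySem.List.length_pyRange_one] at hj
      omega
    rw [PySem.List.pyGetD_map_pyRange_of_nonneg _ m0 j 0 h0 hj']
    exact sum_ite_cnt (m0 :: t) j

-- ===== VERDICT (by name: the statement is the Claim_ definition above) =====
theorem is_horizontal_strip_py_spec : Claim_equal_is_horizontal_strip_py := by
  intro mu lam _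
  unfold Spec_is_horizontal_strip_py is_horizontal_strip_py is_horizontal_strip_py_alt
  dsimp only
  set mlen : Int := if 0 < mu.headD 0 then mu.headD 0 else 0 with hmlen
  set llen : Int := if 0 < lam.headD 0 then lam.headD 0 else 0 with hllen
  have hML : ((if mu = [] then [] else partition_conjugate_py mu).length : Int) = mlen :=
    conj_len mu
  have hLL : ((if lam = [] then [] else partition_conjugate_py lam).length : Int) = llen :=
    conj_len lam
  have hmlen0 : 0 ≤ mlen := by rw [hmlen]; split <;> omega
  have hllen0 : 0 ≤ llen := by rw [hllen]; split <;> omega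
  rw [hML, hLL]
  -- A side: the range loop over the conjugates is the column-wise test
  rw [loopA_all mu lam _ _ mlen llen hML hLL
      (fun j h0 hj => by
        have hne : mu ≠ [] := by
          intro h; rw [hmlen, h] at hj; simp at hj; omega
        have hl := hML
        rw [if_neg hne] at hl ⊢
        exact conj_entry mu hne j h0 (by rw [hl]; exact hj))
      (fun j h0 hj => by
        have hne : lam ≠ [] := by
          intro h; rw [hllen, h] at hj; simp at hj; omega
        have hl := hLL
        rw [if_neg hne] at hl ⊢
        exact conj_entry lam hne j h0 (by rw [hl]; exact hj))
      _ (fun j hj => (PySem.List.mem_pyRange_one.mp hj).1)]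
  -- B side: the running-count sweep is the same column-wise test
  have hcnt_mu := countLoop_spec mu
  have hcnt_lam := countLoop_spec lam
  have htopnn : 0 ≤ max mlen llen := le_max_of_le_left hmlen0
  have htop : (0 : Int) + ((max mlen llen).toNat : Int) = max mlen llen := by
    rw [Int.toNat_of_nonneg htopnn]; ring
  rw [show PySem.List.pyRange 0 (max mlen llen) 1
        = PySem.List.pyRange 0 ((0 : Int) + ((max mlen llen).toNat : Int)) 1 from by
      rw [htop]]
  rw [loopB_all mu lam _ _ mlen llen hcnt_mu.2 hcnt_lam.2 (max mlen llen).toNat 0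
      _ _ hcnt_mu.1 hcnt_lam.1]
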